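-- pv_equiv track=rewrite | github.com/Shadowrom2020/KlipperVault | src/klipper_macro_explainer.py | _split_template_filters
-- ===== SOURCE A (Python) =====
-- def _split_template_filters(expression: str) -> list[str]:
--     """Split Jinja expression into base expression and top-level filters."""
--     parts: list[str] = []
--     current: list[str] = []
--     paren_depth = 0
--
--     for char in expression:
--         if char == "|" and paren_depth == 0:
--             part = "".join(current).strip()
--             if part:
--                 parts.append(part)
--             current = []
--             continue
--         if char == "(":
--             paren_depth += 1
--         elif char == ")" and paren_depth > 0:
--             paren_depth -= 1
--         current.append(char)
--
--     tail = "".join(current).strip()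
--     if tail:
--         parts.append(tail)
--     return parts
-- ===== SOURCE B (Python) =====
-- def _split_template_filters(expression: str) -> list[str]:
--     """Split Jinja expression into base expression and top-level filters.
--
--     Re-implementation: repeatedly locate the first top-level '|' with an
--     index scan, slice the segment off, and recurse on the remainder, instead
--     of accumulating characters one by one into the current segment.
--     """
--
--     def first_cut(s: str) -> int:
--         depth = 0
--         for i, ch in enumerate(s):
--             if ch == "(":
--                 depth += 1
--             elif ch == ")" and depth > 0:
--                 depth -= 1
--             elif ch == "|" and depth == 0:
--                 return i
--         return -1
--
--     parts: list[str] = []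
--     rest = expression
--     i = first_cut(rest)
--     while i != -1:
--         piece = rest[:i].strip()
--         if piece:
--             parts.append(piece)
--         rest = rest[i + 1:]
--         i = first_cut(rest)
--     tail = rest.strip()
--     if tail:
--         parts.append(tail)
--     return parts
-- ===== Notes on version B (the rewrite author's own statement) =====
-- stated objective: alternative
-- what changed: Replaced the single-pass char-accumulator parser with repeated find-first-top-level-pipe index scans plus string slicing of whole segments.
import Mathlib
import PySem

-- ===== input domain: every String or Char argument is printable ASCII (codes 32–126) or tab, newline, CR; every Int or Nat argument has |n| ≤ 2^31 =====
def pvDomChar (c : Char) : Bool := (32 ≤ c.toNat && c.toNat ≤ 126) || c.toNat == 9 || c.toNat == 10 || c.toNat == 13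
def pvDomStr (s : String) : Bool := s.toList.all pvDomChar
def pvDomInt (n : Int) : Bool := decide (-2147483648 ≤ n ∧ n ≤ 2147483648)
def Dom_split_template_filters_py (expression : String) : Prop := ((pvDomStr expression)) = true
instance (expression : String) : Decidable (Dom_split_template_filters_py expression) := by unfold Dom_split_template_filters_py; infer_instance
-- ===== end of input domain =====

-- B replaces A's char-by-char accumulator parse with repeated first-top-level-pipe index scans
-- plus slicing of whole segments (objective: alternative decomposition, same behaviour).

-- ===== PORT A =====
def pvStepA (st : List String × List Char × Int) (c : Char) : List String × List Char × Int :=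
  match st with
  | (parts, current, depth) =>
    if c = '|' ∧ depth = 0 then
      let part := PySem.Chars.strip current
      ((if part ≠ [] then parts ++ [String.ofList part] else parts), [], depth)
    else
      let depth' := if c = '(' then depth + 1
        else if c = ')' ∧ depth > 0 then depth - 1
        else depth
      (parts, current ++ [c], depth')

def split_template_filters_py (expression : String) : List String :=
  match expression.toList.foldl pvStepA ([], [], 0) with
  | (parts, current, _) =>
    let tail := PySem.Chars.strip current
    if tail ≠ [] then parts ++ [String.ofList tail] else parts

-- ===== PORT B =====
-- first_cut: index of the first '|' at paren depth 0, or -1 (i is the enumerate index)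
def pvFirstCut : List Char → Int → Nat → Int
  | [], _, _ => -1
  | c :: cs, depth, i =>
    if c = '(' then pvFirstCut cs (depth + 1) (i + 1)
    else if c = ')' ∧ depth > 0 then pvFirstCut cs (depth - 1) (i + 1)
    else if c = '|' ∧ depth = 0 then (i : Int)
    else pvFirstCut cs depth (i + 1)

-- needed by pvBLoop's decreasing_by (cited by name there)
theorem pvFirstCut_bounds (s : List Char) (d : Int) (k : Nat) :
    pvFirstCut s d k = -1 ∨ ((k : Int) ≤ pvFirstCut s d k ∧ pvFirstCut s d k < (k : Int) + s.length) := by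
  induction s generalizing d k with
  | nil => left; rfl
  | cons c cs ih =>
    simp only [pvFirstCut]
    split_ifs with h1 h2 h3
    · rcases ih (d + 1) (k + 1) with h | ⟨hl, hr⟩
      · left; exact h
      · right; constructor
        · omega
        · simp only [List.length_cons]; push_cast at hr ⊢; omega
    · rcases ih (d - 1) (k + 1) with h | ⟨hl, hr⟩
      · left; exact h
      · right; constructor
        · omega
        · simp only [List.length_cons]; push_cast at hr ⊢; omega
    · right; constructor
      · omega
      · simp only [List.length_cons]; push_cast; omega
    · rcases ih d (k + 1) with h | ⟨hl, hr⟩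
      · left; exact h
      · right; constructor
        · omega
        · simp only [List.length_cons]; push_cast at hr ⊢; omega

def pvBLoop (rest : List Char) (parts : List String) : List String :=
  let i := pvFirstCut rest 0 0
  if hi : i ≠ -1 then
    let piece := PySem.Chars.strip (PySem.List.slice rest none (some i))
    pvBLoop (PySem.List.slice rest (some (i + 1)) none)
      (if piece ≠ [] then parts ++ [String.ofList piece] else parts)
  else
    let tail := PySem.Chars.strip rest
    if tail ≠ [] then parts ++ [String.ofList tail] else parts
termination_by rest.length
decreasing_by
  rcases pvFirstCut_bounds rest 0 0 with h | ⟨hl, hr⟩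
  · exact absurd h hi
  · rw [PySem.List.slice_from _ (by omega)]
    simp only [List.length_drop]
    omega

def split_template_filters_py_alt (expression : String) : List String :=
  pvBLoop expression.toList []

-- ===== PRECONDITION & SPEC =====
def Spec_split_template_filters_py (expression : String) (out : List String) : Prop := out = split_template_filters_py_alt expression
instance (expression : String) (out : List String) : Decidable (Spec_split_template_filters_py expression out) := by unfold Spec_split_template_filters_py; infer_instance

-- ===== CLAIM (what is proved, stated in full; the proofs are below) =====
def Claim_equal_split_template_filters_py : Prop := ∀ (expression : String), Dom_split_template_filters_py expression → Spec_split_template_filters_py expression (split_template_filters_py expression)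

-- ===== LEMMAS AND PROOFS =====
-- strip-filter of one finished segment
def pvStripF (cs : List Char) : List String :=
  if PySem.Chars.strip cs ≠ [] then [String.ofList (PySem.Chars.strip cs)] else []

-- A's run: the fold plus the trailing-segment finish
def pvARun (s : List Char) (parts : List String) (cur : List Char) (d : Int) : List String :=
  match s.foldl pvStepA (parts, cur, d) with
  | (p, c, _) =>
    let tail := PySem.Chars.strip c
    if tail ≠ [] then p ++ [String.ofList tail] else p

-- shift: the enumerate index only offsets a found result
theorem pvFirstCut_shift (s : List Char) (d : Int) (k : Nat) :
    pvFirstCut s d (k + 1) = if pvFirstCut s d k = -1 then -1 else pvFirstCut s d k + 1 := by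
  induction s generalizing d k with
  | nil => simp [pvFirstCut]
  | cons c cs ih =>
    by_cases h1 : c = '('
    · simp only [pvFirstCut, if_pos h1]; exact ih _ _
    · by_cases h2 : c = ')' ∧ d > 0
      · simp only [pvFirstCut, if_neg h1, if_pos h2]; exact ih _ _
      · by_cases h3 : c = '|' ∧ d = 0
        · simp only [pvFirstCut, if_neg h1, if_neg h2, if_pos h3]
          have : ¬ ((k : Int) = -1) := by omega
          simp [this]
        · simp only [pvFirstCut, if_neg h1, if_neg h2, if_neg h3]; exact ih _ _

theorem pvFirstCut_one_eq_neg_one {cs : List Char} {d : Int}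
    (h : pvFirstCut cs d 1 = -1) : pvFirstCut cs d 0 = -1 := by
  have hs := pvFirstCut_shift cs d 0
  rcases pvFirstCut_bounds cs d 0 with hb | ⟨hl, hr⟩
  · exact hb
  · by_contra hne
    rw [if_neg hne] at hs
    norm_num at hs
    omega

theorem pvARun_no_cut (s : List Char) (parts : List String) (cur : List Char) (d : Int)
    (h : pvFirstCut s d 0 = -1) :
    pvARun s parts cur d = parts ++ pvStripF (cur ++ s) := by
  induction s generalizing parts cur d with
  | nil =>
    simp only [pvARun, List.foldl_nil, List.append_nil, pvStripF]
    split_ifs <;> simp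
  | cons c cs ih =>
    by_cases hp : c = '|' ∧ d = 0
    · exfalso
      simp [pvFirstCut, hp.1, hp.2] at h
    · have hstep : pvStepA (parts, cur, d) c
          = (parts, cur ++ [c],
             if c = '(' then d + 1 else if c = ')' ∧ d > 0 then d - 1 else d) := by
        simp [pvStepA, hp]
      have hfc : pvFirstCut (c :: cs)
          d 0 = pvFirstCut cs (if c = '(' then d + 1 else if c = ')' ∧ d > 0 then d - 1 else d) 1 := by
        by_cases h1 : c = '('
        · simp [pvFirstCut, h1]
        · by_cases h2 : c = ')' ∧ d > 0
          · simp [pvFirstCut, h2]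
          · simp [pvFirstCut, h1, h2, hp]
      rw [hfc] at h
      have h0 := pvFirstCut_one_eq_neg_one h
      have := ih parts (cur ++ [c]) _ h0
      simp only [pvARun, List.foldl_cons, hstep]
      simp only [pvARun] at this
      rw [this]
      simp

theorem pvFold_cut (s : List Char) (parts : List String) (cur : List Char) (d : Int) (r : Nat)
    (h : pvFirstCut s d 0 = (r : Int)) :
    s.foldl pvStepA (parts, cur, d)
      = (s.drop (r + 1)).foldl pvStepA (parts ++ pvStripF (cur ++ s.take r), [], 0) := by
  induction s generalizing parts cur d r with
  | nil => simp [pvFirstCut] at h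
  | cons c cs ih =>
    by_cases hp : c = '|' ∧ d = 0
    · have hr : (r : Int) = 0 := by
        simp [pvFirstCut, hp.1, hp.2] at h; omega
      have hr0 : r = 0 := by exact_mod_cast hr
      subst hr0
      simp only [List.foldl_cons, List.take_zero, List.append_nil, List.drop_succ_cons,
        List.drop_zero]
      have hstep : pvStepA (parts, cur, d) c = (parts ++ pvStripF cur, [], d) := by
        simp only [pvStepA, if_pos hp, pvStripF]
        split_ifs <;> simp
      rw [hstep, hp.2]
    · have hstep : pvStepA (parts, cur, d) c
          = (parts, cur ++ [c],
             if c = '(' then d + 1 else if c = ')' ∧ d > 0 then d - 1 else d) := by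
        simp [pvStepA, hp]
      have hfc : pvFirstCut (c :: cs)
          d 0 = pvFirstCut cs (if c = '(' then d + 1 else if c = ')' ∧ d > 0 then d - 1 else d) 1 := by
        by_cases h1 : c = '('
        · simp [pvFirstCut, h1]
        · by_cases h2 : c = ')' ∧ d > 0
          · simp [pvFirstCut, h2]
          · simp [pvFirstCut, h1, h2, hp]
      rw [hfc] at h
      set d' := if c = '(' then d + 1 else if c = ')' ∧ d > 0 then d - 1 else d with hd'
      have hs := pvFirstCut_shift cs d' 0
      norm_num at hs
      rcases pvFirstCut_bounds cs d' 0 with hb | ⟨hl, hr⟩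
      · rw [if_pos hb] at hs; rw [hs] at h; omega
      · have hne : pvFirstCut cs d' 0 ≠ -1 := by omega
        rw [if_neg hne] at hs
        have hr1 : 1 ≤ r := by omega
        have hbase : pvFirstCut cs d' 0 = ((r - 1 : Nat) : Int) := by
          push_cast [hr1]
          omega
        have := ih parts (cur ++ [c]) d' (r - 1) hbase
        simp only [List.foldl_cons, hstep]
        rw [this]
        have htake : (c :: cs).take r = c :: cs.take (r - 1) := by
          cases r with
          | zero => omega
          | succ n => simp
        have hdrop : (c :: cs).drop (r + 1) = cs.drop (r - 1 + 1) := by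
          cases r with
          | zero => omega
          | succ n => simp
        rw [htake, hdrop]
        simp

theorem pvARun_eq_pvBLoop (s : List Char) (parts : List String) :
    pvARun s parts [] 0 = pvBLoop s parts := by
  induction hly : s.length using Nat.strong_induction_on generalizing s parts with
  | _ n ih =>
    subst hly
    rw [pvBLoop]
    rcases pvFirstCut_bounds s 0 0 with hb | ⟨hl, hr⟩
    · rw [dif_neg (by simpa using hb)]
      rw [pvARun_no_cut s parts [] 0 hb]
      simp only [List.nil_append, pvStripF]
      split_ifs <;> simp
    · have hne : pvFirstCut s 0 0 ≠ -1 := by omega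
      rw [dif_pos hne]
      set i := pvFirstCut s 0 0 with hi
      have hr0 : i = ((i.toNat : Nat) : Int) := by omega
      have hcut := pvFold_cut s parts [] 0 i.toNat (by omega)
      have hlen : s.length > i.toNat := by omega
      have harun : pvARun s parts [] 0 = pvARun (s.drop (i.toNat + 1)) (parts ++ pvStripF (s.take i.toNat)) [] 0 := by
        simp only [pvARun, hcut, List.nil_append]
      rw [harun]
      have hslice_from : PySem.List.slice s (some (i + 1)) none = s.drop (i.toNat + 1) := by
        rw [PySem.List.slice_from _ (by omega)]
        congr 1
        omega
      have hslice_to : PySem.List.slice s none (some i) = s.take i.toNat := by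
        rw [PySem.List.slice_to _ (by omega)]
      have hlt : (s.drop (i.toNat + 1)).length < s.length := by
        simp only [List.length_drop]; omega
      rw [ih _ hlt _ _ rfl]
      rw [hslice_from, hslice_to]
      congr 1
      simp only [pvStripF]
      split_ifs <;> simp

-- ===== VERDICT (by name: the statement is the Claim_ definition above) =====
theorem split_template_filters_py_spec : Claim_equal_split_template_filters_py := by
  intro e _
  unfold Spec_split_template_filters_py split_template_filters_py_alt
  have h : split_template_filters_py e = pvARun e.toList [] [] 0 := by
    simp [split_template_filters_py, pvARun]
  rw [h, pvARun_eq_pvBLoop]
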